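-- pv_equiv track=rewrite | github.com/tomasmajercik/PKS_Project_CustomTCP | Functions.py | de_change
-- ===== SOURCE A (Python) =====
-- def de_change(message):
--     new_message = ""
--     for letter in message:
--         if letter != " ":
--             new_message += letter
--
--     final_message = ""
--
--     for i in range(0, len(new_message), 2):
--         if i+1 < len(new_message):
--             final_message += new_message[i+1] + new_message[i]
--         else: final_message += new_message[i]
--     return final_message
-- ===== SOURCE B (Python) =====
-- def de_change(message):
--     s = ''.join(c for c in message if c != ' ')
--     odd, even = s[1::2], s[0::2]
--     out = ''.join(o + e for o, e in zip(odd, even))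
--     return out + s[-1] if len(s) % 2 else out
-- ===== Notes on version B (the rewrite author's own statement) =====
-- stated objective: simpler
-- what changed: Replaces the index-stepped loop with conditional pair indexing by strided slices s[1::2]/s[0::2] interleaved via zip, appending the trailing character when the stripped length is odd.
import Mathlib
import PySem

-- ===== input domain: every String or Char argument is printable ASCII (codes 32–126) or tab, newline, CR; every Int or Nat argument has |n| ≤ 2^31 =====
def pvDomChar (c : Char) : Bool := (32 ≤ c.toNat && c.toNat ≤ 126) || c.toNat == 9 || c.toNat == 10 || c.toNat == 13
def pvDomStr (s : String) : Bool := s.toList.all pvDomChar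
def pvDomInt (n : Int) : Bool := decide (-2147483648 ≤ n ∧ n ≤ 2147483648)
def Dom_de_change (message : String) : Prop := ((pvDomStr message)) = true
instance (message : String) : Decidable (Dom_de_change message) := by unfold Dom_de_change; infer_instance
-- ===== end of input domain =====

-- B replaces A's index-stepped pair-swap loop by interleaving the strided slices s[1::2] and s[0::2] (simpler: no index arithmetic).


-- ===== PORT A =====
def de_change (message : String) : String :=
  let newMessage : List Char :=
    message.toList.foldl (fun acc letter => if letter ≠ ' ' then acc ++ [letter] else acc) []
  let finalMessage : List Char :=
    (PySem.List.pyRange 0 newMessage.length 2).foldl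
      (fun acc i =>
        if i + 1 < (newMessage.length : Int) then
          acc ++ [PySem.List.pyGetD newMessage (i + 1) ' ', PySem.List.pyGetD newMessage i ' ']
        else
          acc ++ [PySem.List.pyGetD newMessage i ' ']) []
  String.ofList finalMessage

-- ===== PORT B =====
def de_change_alt (message : String) : String :=
  let s : List Char := message.toList.filter (fun c => c ≠ ' ')
  let od : List Char := (PySem.List.slice? s (some 1) none 2).getD []
  let ev : List Char := (PySem.List.slice? s (some 0) none 2).getD []
  let out : List Char := (od.zip ev).flatMap (fun p => [p.1, p.2])
  if s.length % 2 ≠ 0 then String.ofList (out ++ [PySem.List.pyGetD s (-1) ' '])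
  else String.ofList out

-- ===== PRECONDITION & SPEC =====
def Spec_de_change (message : String) (out : String) : Prop := out = de_change_alt message
instance (message : String) (out : String) : Decidable (Spec_de_change message out) := by unfold Spec_de_change; infer_instance

-- ===== CLAIM (what is proved, stated in full; the proofs are below) =====
def Claim_equal_de_change : Prop := ∀ (message : String), Dom_de_change message → Spec_de_change message (de_change message)

-- ===== LEMMAS AND PROOFS =====

-- the common value both programs compute: adjacent pairs swapped
def pvSwap : List Char → List Char
  | a :: b :: t => b :: a :: pvSwap t
  | l => l

-- characters at even / odd positions
def pvEv : List Char → List Char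
  | [] => []
  | [a] => [a]
  | a :: _ :: t => a :: pvEv t

def pvOd : List Char → List Char
  | [] => []
  | [_] => []
  | _ :: b :: t => b :: pvOd t

lemma pyRange_two_nil (a b : Int) (h : b ≤ a) :
    PySem.List.pyRange a b 2 = [] := by
  rw [PySem.List.pyRange_of_pos a b (by norm_num)]
  rw [if_neg (by omega)]
  simp

lemma pyRange_two_cons (a b : Int) (h : a < b) :
    PySem.List.pyRange a b 2 = a :: PySem.List.pyRange (a + 2) b 2 := by
  rw [PySem.List.pyRange_of_pos a b (by norm_num),
      PySem.List.pyRange_of_pos (a+2) b (by norm_num)]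
  rw [if_pos h]
  by_cases h2 : a + 2 < b
  · rw [if_pos h2]
    have hc : ((b - a + 2 - 1) / 2).toNat = ((b - (a+2) + 2 - 1) / 2).toNat + 1 := by omega
    rw [hc, List.range_succ_eq_map]
    simp [List.map_map, Function.comp]
    intro k _; ring
  · rw [if_neg h2]
    have hc : ((b - a + 2 - 1) / 2).toNat = 1 := by omega
    simp [hc]

-- A's swap loop computes pvSwap of the suffix of the space-free string it has not visited yet
lemma A_loop (full : List Char) : ∀ (k a : Nat), full.length - a ≤ k → ∀ (acc : List Char),
    (PySem.List.pyRange a (full.length) 2).foldl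
      (fun acc i =>
        if i + 1 < (full.length : Int) then
          acc ++ [PySem.List.pyGetD full (i + 1) ' ', PySem.List.pyGetD full i ' ']
        else
          acc ++ [PySem.List.pyGetD full i ' ']) acc
    = acc ++ pvSwap (full.drop a) := by
  intro k
  induction k with
  | zero =>
    intro a h acc
    rw [pyRange_two_nil _ _ (by exact_mod_cast Nat.le_of_sub_eq_zero (Nat.le_zero.mp h))]
    simp [List.drop_eq_nil_of_le (by omega : full.length ≤ a), pvSwap]
  | succ k ih =>
    intro a h acc
    by_cases hle : full.length ≤ a
    · rw [pyRange_two_nil _ _ (by exact_mod_cast hle)]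
      simp [List.drop_eq_nil_of_le hle, pvSwap]
    · have ha : a < full.length := by omega
      rw [pyRange_two_cons _ _ (by exact_mod_cast ha)]
      simp only [List.foldl_cons]
      have hcast : (a : Int) + 2 = ((a + 2 : Nat) : Int) := by push_cast; ring
      by_cases h2 : a + 1 < full.length
      · rw [if_pos (by exact_mod_cast h2)]
        have h1 : (a : Int) + 1 = ((a + 1 : Nat) : Int) := by push_cast; ring
        rw [h1, PySem.List.pyGetD_natCast, PySem.List.pyGetD_natCast, hcast,
            ih (a + 2) (by omega)]
        rw [List.drop_eq_getElem_cons ha, List.drop_eq_getElem_cons h2]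
        simp [pvSwap, List.getElem?_eq_getElem ha, List.getElem?_eq_getElem h2]
      · rw [if_neg (by exact_mod_cast h2)]
        rw [hcast, PySem.List.pyGetD_natCast, ih (a + 2) (by omega)]
        rw [List.drop_eq_getElem_cons ha, List.drop_eq_nil_of_le (by omega : full.length ≤ a + 1),
            List.drop_eq_nil_of_le (by omega : full.length ≤ a + 2)]
        simp [pvSwap, List.getElem?_eq_getElem ha]

lemma fm_ev (s : List Char) :
    List.filterMap (fun k : Nat => s[2*k]?) (List.range ((s.length+1)/2)) = pvEv s := by
  match s with
  | [] => simp [pvEv]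
  | [a] => simp [pvEv]
  | a :: b :: t =>
    have hc : ((a :: b :: t).length + 1)/2 = (t.length + 1)/2 + 1 := by simp; omega
    rw [hc, List.range_succ_eq_map]
    simp only [List.filterMap_cons, List.filterMap_map]
    have : ∀ k : Nat, (a :: b :: t)[2*(k+1)]? = t[2*k]? := by
      intro k
      have : 2*(k+1) = (2*k) + 1 + 1 := by ring
      simp [this]
    simp only [Function.comp_def, this]
    simp [pvEv, fm_ev t]

lemma fm_od (s : List Char) :
    List.filterMap (fun k : Nat => s[2*k+1]?) (List.range (s.length/2)) = pvOd s := by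
  match s with
  | [] => simp [pvOd]
  | [a] => simp [pvOd]
  | a :: b :: t =>
    have hc : (a :: b :: t).length/2 = t.length/2 + 1 := by simp; omega
    rw [hc, List.range_succ_eq_map]
    simp only [List.filterMap_cons, List.filterMap_map]
    have : ∀ k : Nat, (a :: b :: t)[2*(k+1)+1]? = t[2*k+1]? := by
      intro k
      have : 2*(k+1)+1 = (2*k+1) + 1 + 1 := by ring
      simp [this]
    simp only [Function.comp_def, this]
    simp [pvOd, fm_od t]

-- B's slices are exactly the even- / odd-position sublists
lemma slice?_two_zero (s : List Char) :
    PySem.List.slice? s (some 0) none 2 = some (pvEv s) := by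
  rw [← fm_ev]
  simp only [PySem.List.slice?, PySem.List.sliceIndices]
  norm_num
  have hc : (if 0 < s.length then (((s.length:Int) + 2 - 1) / 2).toNat else 0)
      = (s.length + 1)/2 := by split_ifs <;> omega
  rw [hc]
  apply List.filterMap_congr
  intro k _
  have h2 : ((2:Int) * (k:Int)).toNat = 2 * k := by omega
  rw [h2]

lemma slice?_two_one (s : List Char) :
    PySem.List.slice? s (some 1) none 2 = some (pvOd s) := by
  rw [← fm_od]
  simp only [PySem.List.slice?, PySem.List.sliceIndices]
  norm_num
  rcases s with _ | ⟨c, t⟩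
  · simp
  · have hmin : min 1 (((c :: t).length : Nat) : Int) = 1 := by
      simp only [List.length_cons]; omega
    rw [hmin]
    have hc : (if 1 < (c :: t).length then (((((c :: t).length : Nat) : Int) - 1 + 2 - 1) / 2).toNat else 0)
        = (c :: t).length / 2 := by
      simp only [List.length_cons]; split_ifs <;> omega
    rw [hc]
    apply List.filterMap_congr
    intro k _
    have h2 : ((1:Int) + 2 * (k:Int)).toNat = 2 * k + 1 := by omega
    rw [h2]

-- zipping odds with evens and appending the odd tail rebuilds pvSwap
lemma zip_swap (s : List Char) :
    ((pvOd s).zip (pvEv s)).flatMap (fun p => [p.1, p.2])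
      ++ (if s.length % 2 ≠ 0 then [s.getD (s.length - 1) ' '] else [])
    = pvSwap s := by
  match s with
  | [] => simp [pvOd, pvEv, pvSwap]
  | [a] => simp [pvOd, pvEv, pvSwap]
  | a :: b :: t =>
    have ih := zip_swap t
    simp only [pvOd, pvEv, pvSwap, List.zip_cons_cons, List.flatMap_cons, List.length_cons]
    have hm : (t.length + 1 + 1) % 2 = t.length % 2 := by omega
    rw [hm]
    by_cases hp : t.length % 2 ≠ 0
    · have hne : t ≠ [] := by intro h; rw [h] at hp; simp at hp
      have h1 : 1 ≤ t.length := by cases t <;> simp_all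
      rw [if_pos hp] at ih ⊢
      have hg : (a :: b :: t).getD (t.length + 1 + 1 - 1) ' ' = t.getD (t.length - 1) ' ' := by
        have h3 : t.length + 1 + 1 - 1 = (t.length - 1) + 1 + 1 := by omega
        rw [h3, List.getD_cons_succ, List.getD_cons_succ]
      rw [hg, ← ih]; simp
    · rw [if_neg hp] at ih ⊢
      rw [← ih]; simp

-- s[-1] on a nonempty list is the last element
lemma pyGetD_neg_one (s : List Char) (h : s ≠ []) :
    PySem.List.pyGetD s (-1) ' ' = s.getD (s.length - 1) ' ' := by
  have h1 : 1 ≤ s.length := by cases s <;> simp_all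
  simp [PySem.List.pyGetD, PySem.List.pyGet?, PySem.List.pyIdx?]
  rw [if_pos h1]
  simp

-- A's filtering loop is List.filter
lemma filter_loop (l : List Char) :
    l.foldl (fun acc letter => if letter ≠ ' ' then acc ++ [letter] else acc) []
      = l.filter (fun c => c ≠ ' ') := by
  have := PySem.List.foldl_append_if (fun c => decide (c ≠ ' ')) id l []
  simpa using this

-- ===== VERDICT (by name: the statement is the Claim_ definition above) =====
theorem de_change_spec : Claim_equal_de_change := by
  intro message _
  unfold Spec_de_change de_change de_change_alt
  dsimp only
  rw [filter_loop]
  set s := message.toList.filter (fun c => c ≠ ' ') with hs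
  have hA := A_loop s s.length 0 (by omega) []
  simp only [Nat.cast_zero, List.drop_zero, List.nil_append] at hA
  rw [hA, slice?_two_zero, slice?_two_one]
  simp only [Option.getD_some]
  rw [← zip_swap s]
  by_cases hp : s.length % 2 ≠ 0
  · have hne : s ≠ [] := by intro h; rw [h] at hp; simp at hp
    rw [if_pos hp, if_pos hp, pyGetD_neg_one s hne]
  · rw [if_neg hp, if_neg hp]
    simp
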